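-- pv_equiv track=rewrite | github.com/wikimedia/operations-debs-contenttranslation-apertium-swe | dev/saldo/saldo-to-dix.py | uniq_gen
-- ===== SOURCE A (Python) =====
-- def LR_sort_key(e):
--     """Prioritise certain forms if we have several forms with one analysis"""
--     return ("-" in e[1], e[1])
--
-- def uniq_gen(pdid):
--     """Ensure we only generate one l for each r+t"""
--     gen=set()
--     ret=set()
--     for LR,l,r,t,p in sorted(pdid, key=LR_sort_key):
--         # If we've already added a form for this analysis without LR,
--         # then ensure we don't generate this form:
--         if (r,t,p) in gen:
--             LR = True
--         ret.add((LR, l, r, t, p))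
--         if not LR:
--             gen.add((r,t,p))
--     return ret
-- ===== SOURCE B (Python) =====
-- def uniq_gen(pdid):
--     """Ensure we only generate one l for each r+t"""
--     s = sorted(pdid, key=lambda e: ("-" in e[1], e[1]))
--     first = {}
--     for i, (LR, l, r, t, p) in enumerate(s):
--         if not LR:
--             first.setdefault((r, t, p), i)
--     return {e if (not e[0] and first[(e[2], e[3], e[4])] == i) else (True,) + e[1:]
--             for i, e in enumerate(s)}
-- ===== Notes on version B (the rewrite author's own statement) =====
-- stated objective: alternative
-- what changed: A interleaves emission with an online 'gen' state set updated during one scan of the sorted list; B instead precomputes, in a separate indexing pass, a dict mapping each (r,t,p) group to the index of its first LR-false entry in the sorted list, and then produces the result as a single pure set comprehension over the enumerated sorted list (an entry keeps its LR iff it is LR-false and sits at its group's recorded first index).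
import Mathlib
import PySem

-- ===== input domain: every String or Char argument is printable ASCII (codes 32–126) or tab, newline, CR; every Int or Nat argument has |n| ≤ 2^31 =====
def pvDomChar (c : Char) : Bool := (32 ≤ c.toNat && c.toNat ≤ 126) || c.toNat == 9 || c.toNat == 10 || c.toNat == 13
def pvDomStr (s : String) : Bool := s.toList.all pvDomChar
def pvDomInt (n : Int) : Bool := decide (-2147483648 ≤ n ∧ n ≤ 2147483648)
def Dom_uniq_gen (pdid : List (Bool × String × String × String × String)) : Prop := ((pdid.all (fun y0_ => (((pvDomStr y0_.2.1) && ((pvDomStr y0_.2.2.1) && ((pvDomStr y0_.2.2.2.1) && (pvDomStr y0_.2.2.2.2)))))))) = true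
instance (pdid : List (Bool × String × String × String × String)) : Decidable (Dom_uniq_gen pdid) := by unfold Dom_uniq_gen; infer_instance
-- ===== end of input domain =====

-- B replaces A's online 'gen'-state scan by a precomputed first-LR-false-index dict plus a pure
-- mapping pass (alternative decomposition, same O(n log n) cost); return values proved equal.

-- ===== PORT A =====
-- LR_sort_key(e) = ("-" in e[1], e[1]) : a tuple key, split into its two components for sorted2
def LR_key1 (e : Bool × String × String × String × String) : Bool := PySem.Str.isIn "-" e.2.1
def LR_key2 (e : Bool × String × String × String × String) : String := e.2.1

def uniq_gen (pdid : List (Bool × String × String × String × String)) : List (Bool × String × String × String × String) :=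
  -- state = (gen, ret); 'for LR,l,r,t,p in sorted(pdid, key=LR_sort_key): …'
  ((PySem.List.sorted2 pdid LR_key1 LR_key2).foldl
    (fun st e =>
      match e with
      | (LR0, l, r, t, p) =>
        let LR := LR0 || PySem.Set.contains st.1 (r, t, p)   -- 'if (r,t,p) in gen: LR = True'
        (if LR then st.1 else PySem.Set.add st.1 (r, t, p),  -- 'if not LR: gen.add((r,t,p))'
         PySem.Set.add st.2 (LR, l, r, t, p)))               -- 'ret.add((LR,l,r,t,p))'
    ((PySem.Set.empty : PySem.Set (String × String × String)),
     (PySem.Set.empty : PySem.Set (Bool × String × String × String × String)))).2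

-- ===== PORT B =====
def grp (e : Bool × String × String × String × String) : String × String × String :=
  (e.2.2.1, e.2.2.2.1, e.2.2.2.2)

def uniq_gen_alt (pdid : List (Bool × String × String × String × String)) : List (Bool × String × String × String × String) :=
  let s := PySem.List.sorted2 pdid LR_key1 LR_key2
  -- 'for i,(LR,l,r,t,p) in enumerate(s): if not LR: first.setdefault((r,t,p), i)'
  let first := (PySem.List.enumerate s).foldl
    (fun d ie => if ie.2.1 then d else PySem.Dict.setdefault d (grp ie.2) ie.1)
    (PySem.Dict.empty : PySem.Dict (String × String × String) Int)
  -- set comprehension; 'first[(r,t,p)] == i' — the key is present whenever LR is false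
  -- (setdefault stored the group's first LR-false index), so get? == some i is exact here
  PySem.Set.ofList ((PySem.List.enumerate s).map (fun ie =>
    if !ie.2.1 && (PySem.Dict.get? first (grp ie.2) == some ie.1) then ie.2
    else (true, ie.2.2)))

-- ===== PRECONDITION & SPEC =====
def Spec_uniq_gen (pdid : List (Bool × String × String × String × String)) (out : List (Bool × String × String × String × String)) : Prop := out = uniq_gen_alt pdid
instance (pdid : List (Bool × String × String × String × String)) (out : List (Bool × String × String × String × String)) : Decidable (Spec_uniq_gen pdid out) := by unfold Spec_uniq_gen; infer_instance

-- ===== CLAIM (what is proved, stated in full; the proofs are below) =====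
def Claim_equal_uniq_gen : Prop := ∀ (pdid : List (Bool × String × String × String × String)), Dom_uniq_gen pdid → Spec_uniq_gen pdid (uniq_gen pdid)

-- ===== LEMMAS AND PROOFS =====

-- 'e is an LR-false entry of group g'
def pvPred (g : String × String × String) (e : Bool × String × String × String × String) : Bool :=
  !e.1 && (grp e == g)

-- The setdefault fold records, per group, the index of its first LR-false entry.
theorem pvFirst_get? (s : List (Bool × String × String × String × String)) (k : Int)
    (d : PySem.Dict (String × String × String) Int) (g : String × String × String) :
    ((PySem.List.enumerate s k).foldl
      (fun d ie => if ie.2.1 then d else PySem.Dict.setdefault d (grp ie.2) ie.1) d).get? g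
    = (d.get? g).or ((List.findIdx? (pvPred g) s).map (fun n => (n : Int) + k)) := by
  induction s generalizing k d with
  | nil => simp [PySem.List.enumerate_nil]
  | cons x xs ih =>
    rw [PySem.List.enumerate_cons, List.foldl_cons]
    by_cases hx : x.1 = true
    · rw [if_pos hx, ih]
      have hp : pvPred g x = false := by simp [pvPred, hx]
      rw [List.findIdx?_cons, hp]
      cases List.findIdx? (pvPred g) xs
      · simp
      · simp
        congr 1
        omega
    · rw [if_neg hx, ih]
      rw [List.findIdx?_cons]
      have hx' : x.1 = false := by simpa using hx
      by_cases hg : g = grp x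
      · have hp : pvPred g x = true := by simp [pvPred, hg, hx']
        rw [hp, if_pos rfl]
        rw [hg, PySem.Dict.get?_setdefault_self]
        cases d.get? (grp x) <;> simp
      · have hp : pvPred g x = false := by
          simp [pvPred, hx']
          exact fun h => hg h.symm
        rw [hp, if_neg (by simp)]
        rw [PySem.Dict.get?_setdefault_of_ne d k hg]
        cases List.findIdx? (pvPred g) xs
        · simp
        · simp
          congr 1
          omega

-- Main invariant: A's scan from a state whose 'gen' contains exactly the groups with an
-- LR-false entry in the already-processed prefix produces the same additions as B's pure map.
theorem pvMain (T : List (Bool × String × String × String × String)) :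
    ∀ (s pre : List (Bool × String × String × String × String))
      (gen : PySem.Set (String × String × String))
      (ret : PySem.Set (Bool × String × String × String × String)),
      T = pre ++ s →
      (∀ g, PySem.Set.contains gen g = true ↔ ∃ x ∈ pre, pvPred g x = true) →
      (s.foldl
        (fun st e =>
          match e with
          | (LR0, l, r, t, p) =>
            let LR := LR0 || PySem.Set.contains st.1 (r, t, p)
            (if LR then st.1 else PySem.Set.add st.1 (r, t, p),
             PySem.Set.add st.2 (LR, l, r, t, p)))
        (gen, ret)).2
      = (PySem.List.enumerate s (pre.length : Int)).foldl
          (fun r ie =>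
            PySem.Set.add r
              (if !ie.2.1 && (PySem.Dict.get? ((PySem.List.enumerate T).foldl
                    (fun d ie => if ie.2.1 then d else PySem.Dict.setdefault d (grp ie.2) ie.1)
                    (PySem.Dict.empty : PySem.Dict (String × String × String) Int)) (grp ie.2)
                  == some ie.1) then ie.2
               else (true, ie.2.2))) ret := by
  have hdict : ∀ g, (PySem.Dict.get? ((PySem.List.enumerate T).foldl
        (fun d ie => if ie.2.1 then d else PySem.Dict.setdefault d (grp ie.2) ie.1)
        (PySem.Dict.empty : PySem.Dict (String × String × String) Int)) g)
      = (List.findIdx? (pvPred g) T).map (fun n => (n : Int)) := by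
    intro g
    rw [show PySem.List.enumerate T = PySem.List.enumerate T 0 from rfl, pvFirst_get? T 0]
    cases o : List.findIdx? (pvPred g) T
    · simp
    · simp
  intro s
  induction s with
  | nil => intro pre gen ret _ _; simp [PySem.List.enumerate_nil]
  | cons x xs ih =>
    intro pre gen ret hT Hg
    obtain ⟨LR0, l, r, t, p⟩ := x
    rw [PySem.List.enumerate_cons, List.foldl_cons, List.foldl_cons]
    have hT' : T = (pre ++ [(LR0, l, r, t, p)]) ++ xs := by simp [hT]
    have hlen : ((pre ++ [(LR0, l, r, t, p)]).length : Int) = (pre.length : Int) + 1 := by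
      simp
    by_cases hLR : LR0 = true
    · -- LR already true: emit (True, …), gen unchanged
      subst hLR
      have := ih (pre ++ [(true, l, r, t, p)]) gen (PySem.Set.add ret (true, l, r, t, p)) hT'
        (by
          intro g
          rw [Hg g]
          constructor
          · rintro ⟨y, hy, hp⟩; exact ⟨y, by simp [hy], hp⟩
          · rintro ⟨y, hy, hp⟩
            rcases List.mem_append.mp hy with h | h
            · exact ⟨y, h, hp⟩
            · exfalso; simp at h; subst h; simp [pvPred] at hp)
      rw [hlen] at this
      simpa using this
    · have hLR0 : LR0 = false := by simpa using hLR
      subst hLR0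
      by_cases hc : PySem.Set.contains gen (r, t, p) = true
      · -- group already generated: forced True, gen unchanged
        have hm : ((r, t, p) : String × String × String) ∈ gen :=
          (PySem.Set.contains_iff gen (r, t, p)).mp hc
        obtain ⟨y, hy, hpy⟩ := (Hg (r, t, p)).mp hc
        -- the dict's first index lies strictly inside pre, hence ≠ pre.length
        have hne : ¬ ((PySem.Dict.get? ((PySem.List.enumerate T).foldl
              (fun d ie => if ie.2.1 then d else PySem.Dict.setdefault d (grp ie.2) ie.1)
              (PySem.Dict.empty : PySem.Dict (String × String × String) Int)) (r, t, p))
            = some ((pre.length : Int))) := by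
          rw [hdict]
          have hsome : (List.findIdx? (pvPred (r, t, p)) pre).isSome := by
            rw [List.findIdx?_isSome]
            exact List.any_eq_true.mpr ⟨y, hy, hpy⟩
          obtain ⟨m, hm'⟩ := Option.isSome_iff_exists.mp hsome
          have hmlt : m < pre.length := (List.findIdx?_eq_some_iff_findIdx_eq.mp hm').1
          rw [hT, List.findIdx?_append, hm']
          simp
          omega
        have := ih (pre ++ [(false, l, r, t, p)]) gen (PySem.Set.add ret (true, l, r, t, p)) hT'
          (by
            intro g
            rw [Hg g]
            constructor
            · rintro ⟨z, hz, hp⟩; exact ⟨z, by simp [hz], hp⟩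
            · rintro ⟨z, hz, hp⟩
              rcases List.mem_append.mp hz with h | h
              · exact ⟨z, h, hp⟩
              · simp at h; subst h
                simp [pvPred, grp] at hp
                subst hp; exact ⟨y, hy, hpy⟩)
        rw [hlen] at this
        simp [grp] at hne
        simpa [hm, hne, grp] using this
      · -- fresh group: keep the False entry, extend gen
        have hnm : ((r, t, p) : String × String × String) ∉ gen := fun h =>
          hc ((PySem.Set.contains_iff gen (r, t, p)).mpr h)
        have hnone : List.findIdx? (pvPred (r, t, p)) pre = none := by
          rw [List.findIdx?_eq_none_iff]
          intro z hz
          by_contra hzp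
          exact hc ((Hg (r, t, p)).mpr ⟨z, hz, by simpa using hzp⟩)
        have heq : (PySem.Dict.get? ((PySem.List.enumerate T).foldl
              (fun d ie => if ie.2.1 then d else PySem.Dict.setdefault d (grp ie.2) ie.1)
              (PySem.Dict.empty : PySem.Dict (String × String × String) Int)) (r, t, p))
            = some ((pre.length : Int)) := by
          rw [hdict, hT, List.findIdx?_append, hnone]
          rw [List.findIdx?_cons]
          have hpx : pvPred (r, t, p) (false, l, r, t, p) = true := by simp [pvPred, grp]
          rw [hpx, if_pos rfl]
          simp
        have := ih (pre ++ [(false, l, r, t, p)]) (PySem.Set.add gen (r, t, p))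
          (PySem.Set.add ret (false, l, r, t, p)) hT'
          (by
            intro g
            rw [PySem.Set.contains_iff, PySem.Set.mem_add]
            constructor
            · rintro (h | h)
              · obtain ⟨z, hz, hp⟩ := (Hg g).mp ((PySem.Set.contains_iff gen g).mpr h)
                exact ⟨z, by simp [hz], hp⟩
              · subst h
                exact ⟨(false, l, r, t, p), by simp, by simp [pvPred, grp]⟩
            · rintro ⟨z, hz, hp⟩
              rcases List.mem_append.mp hz with h | h
              · exact Or.inl ((PySem.Set.contains_iff gen g).mp ((Hg g).mpr ⟨z, h, hp⟩))
              · simp at h; subst h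
                right
                simp [pvPred, grp] at hp
                exact hp.symm)
        rw [hlen] at this
        simp [grp] at heq
        simpa [hnm, heq, grp] using this

-- ===== VERDICT (by name: the statement is the Claim_ definition above) =====
theorem uniq_gen_spec : Claim_equal_uniq_gen := by
  intro pdid _
  unfold Spec_uniq_gen uniq_gen uniq_gen_alt
  rw [PySem.Set.ofList_eq_foldl, List.foldl_map]
  have := pvMain (PySem.List.sorted2 pdid LR_key1 LR_key2)
    (PySem.List.sorted2 pdid LR_key1 LR_key2) [] PySem.Set.empty PySem.Set.empty rfl
    (by intro g; simp [PySem.Set.empty])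
  simpa using this
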